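-- pv_equiv track=rewrite | github.com/ElenaShherbakove/PythonData_Engineer | homework6/task6_3.py | queens_shess
-- ===== SOURCE A (Python) =====
-- def queens_shess(queens):
--     for i in range(8):
--         for j in range(i + 1, 8):
--             # Проверяем, находятся ли два ферзя на одной и той же горизонтали, вертикали или диагонали
--             if queens[i][0] == queens[j][0] or \
--                queens[i][1] == queens[j][1] or \
--                abs(queens[i][0] - queens[j][0]) == abs(queens[i][1] - queens[j][1]):
--                 return False
--     return True
-- ===== SOURCE B (Python) =====
-- def queens_shess(queens):
--     rows, cols, diag1, diag2 = set(), set(), set(), set()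
--     for i in range(8):
--         r, c = queens[i][0], queens[i][1]
--         if r in rows or c in cols or (r - c) in diag1 or (r + c) in diag2:
--             return False
--         rows.add(r)
--         cols.add(c)
--         diag1.add(r - c)
--         diag2.add(r + c)
--     return True
-- ===== Notes on version B (the rewrite author's own statement) =====
-- stated objective: idiomatic
-- what changed: Replaced the nested all-pairs scan over queen pairs by a single pass over the 8 queens that maintains seen-sets of rows, columns and both diagonal keys (r-c and r+c), rejecting on the first collision.
import Mathlib
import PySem

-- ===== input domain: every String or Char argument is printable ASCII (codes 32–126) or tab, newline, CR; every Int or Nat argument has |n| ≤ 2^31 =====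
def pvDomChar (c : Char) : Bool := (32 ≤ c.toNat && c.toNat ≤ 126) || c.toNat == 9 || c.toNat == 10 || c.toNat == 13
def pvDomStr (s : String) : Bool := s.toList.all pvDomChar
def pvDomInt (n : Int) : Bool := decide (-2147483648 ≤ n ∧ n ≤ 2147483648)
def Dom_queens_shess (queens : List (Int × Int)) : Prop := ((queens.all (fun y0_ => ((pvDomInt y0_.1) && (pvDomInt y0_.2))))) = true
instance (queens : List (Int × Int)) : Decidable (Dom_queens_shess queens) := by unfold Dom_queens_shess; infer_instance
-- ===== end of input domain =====

-- B replaces A's nested all-pairs scan by one pass over the 8 queens with seen-sets for rows,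
-- columns and the two diagonal directions (idiomatic single-pass formulation).

-- ===== PORT A =====
def qsAInner (queens : List (Int × Int)) (i : Int) : List Int → Bool
  | [] => true
  | j :: js =>
    let qi := PySem.List.pyGetD queens i (0, 0)
    let qj := PySem.List.pyGetD queens j (0, 0)
    if qi.1 == qj.1 || qi.2 == qj.2 || |qi.1 - qj.1| == |qi.2 - qj.2| then false
    else qsAInner queens i js

def qsAOuter (queens : List (Int × Int)) : List Int → Bool
  | [] => true
  | i :: is =>
    if qsAInner queens i (PySem.List.pyRange (i + 1) 8 1) then qsAOuter queens is else false

def queens_shess (queens : List (Int × Int)) : Bool :=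
  qsAOuter queens (PySem.List.pyRange 0 8 1)

-- ===== PORT B =====
def qsBLoop (queens : List (Int × Int)) (rows cols d1 d2 : PySem.Set Int) : List Int → Bool
  | [] => true
  | i :: is =>
    let q := PySem.List.pyGetD queens i (0, 0)
    if PySem.Set.contains rows q.1 || PySem.Set.contains cols q.2 ||
       PySem.Set.contains d1 (q.1 - q.2) || PySem.Set.contains d2 (q.1 + q.2) then false
    else qsBLoop queens (PySem.Set.add rows q.1) (PySem.Set.add cols q.2)
           (PySem.Set.add d1 (q.1 - q.2)) (PySem.Set.add d2 (q.1 + q.2)) is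

def queens_shess_alt (queens : List (Int × Int)) : Bool :=
  qsBLoop queens PySem.Set.empty PySem.Set.empty PySem.Set.empty PySem.Set.empty
    (PySem.List.pyRange 0 8 1)


-- ===== PRECONDITION & SPEC =====
-- Pre_ admits exactly the inputs on which A returns: either at least 8 queens, or a shorter list
-- in which some later queen attacks queen 0 (then A returns False in its first inner loop before
-- reaching an out-of-range index; otherwise A raises IndexError).
def Pre_queens_shess (queens : List (Int × Int)) : Prop :=
  8 ≤ queens.length ∨
    ∃ p ∈ queens.tail, queens.headI.1 = p.1 ∨ queens.headI.2 = p.2 ∨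
      |queens.headI.1 - p.1| = |queens.headI.2 - p.2|
instance (queens : List (Int × Int)) : Decidable (Pre_queens_shess queens) := by
  unfold Pre_queens_shess; infer_instance

def pvWitness_queens_shess : (List (Int × Int)) :=
  [(0, 0), (1, 4), (2, 7), (3, 5), (4, 2), (5, 6), (6, 1), (7, 3)]

def Spec_queens_shess (queens : List (Int × Int)) (out : Bool) : Prop := out = queens_shess_alt queens
instance (queens : List (Int × Int)) (out : Bool) : Decidable (Spec_queens_shess queens out) := by
  unfold Spec_queens_shess; infer_instance

-- ===== CLAIM (what is proved, stated in full; the proofs are below) =====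
def Claim_equal_queens_shess : Prop := ∀ (queens : List (Int × Int)), Dom_queens_shess queens → Pre_queens_shess queens → Spec_queens_shess queens (queens_shess queens)

-- ===== LEMMAS AND PROOFS =====

def AttP (p r : Int × Int) : Prop := p.1 = r.1 ∨ p.2 = r.2 ∨ |p.1 - r.1| = |p.2 - r.2|

def BAttP (p r : Int × Int) : Prop :=
  p.1 = r.1 ∨ p.2 = r.2 ∨ p.1 - p.2 = r.1 - r.2 ∨ p.1 + p.2 = r.1 + r.2

lemma attP_iff_battP (p r : Int × Int) : AttP p r ↔ BAttP p r := by
  unfold AttP BAttP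
  rw [abs_eq_abs]
  omega

lemma qsAInner_true_iff (queens : List (Int × Int)) (i : Int) (js : List Int) :
    qsAInner queens i js = true ↔
      ∀ j ∈ js, ¬ AttP (PySem.List.pyGetD queens i (0, 0)) (PySem.List.pyGetD queens j (0, 0)) := by
  induction js with
  | nil => simp [qsAInner]
  | cons j js ih =>
    simp only [qsAInner, List.mem_cons, AttP]
    split_ifs with h <;> simp only [Bool.or_eq_true, beq_iff_eq] at h
    · simp only [false_iff]
      intro hall
      exact hall j (Or.inl rfl) (by tauto)
    · rw [ih]
      constructor
      · rintro hall x (rfl | hx)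
        · tauto
        · exact hall x hx
      · intro hall x hx
        exact hall x (Or.inr hx)

lemma qsAOuter_true_iff (queens : List (Int × Int)) (is : List Int) :
    qsAOuter queens is = true ↔
      ∀ i ∈ is, qsAInner queens i (PySem.List.pyRange (i + 1) 8 1) = true := by
  induction is with
  | nil => simp [qsAOuter]
  | cons i is ih =>
    simp only [qsAOuter, List.mem_cons]
    split_ifs with h
    · rw [ih]
      constructor
      · rintro hall x (rfl | hx)
        · exact h
        · exact hall x hx
      · intro hall x hx
        exact hall x (Or.inr hx)
    · simp only [false_iff]
      intro hall
      exact h (hall i (Or.inl rfl))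

def scanOKP (queens : List (Int × Int)) : List Int → List Int → Prop
  | _, [] => True
  | done, i :: is =>
      (∀ j ∈ done, ¬ BAttP (PySem.List.pyGetD queens j (0, 0)) (PySem.List.pyGetD queens i (0, 0))) ∧
      scanOKP queens (done ++ [i]) is

lemma qsBLoop_true_iff (queens : List (Int × Int)) (is : List Int) :
    ∀ (done : List Int) (rows cols d1 d2 : PySem.Set Int),
    (∀ x, x ∈ rows ↔ ∃ j ∈ done, (PySem.List.pyGetD queens j (0, 0)).1 = x) →
    (∀ x, x ∈ cols ↔ ∃ j ∈ done, (PySem.List.pyGetD queens j (0, 0)).2 = x) →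
    (∀ x, x ∈ d1 ↔ ∃ j ∈ done, (PySem.List.pyGetD queens j (0, 0)).1 - (PySem.List.pyGetD queens j (0, 0)).2 = x) →
    (∀ x, x ∈ d2 ↔ ∃ j ∈ done, (PySem.List.pyGetD queens j (0, 0)).1 + (PySem.List.pyGetD queens j (0, 0)).2 = x) →
    (qsBLoop queens rows cols d1 d2 is = true ↔ scanOKP queens done is) := by
  induction is with
  | nil => intro done rows cols d1 d2 _ _ _ _; simp [qsBLoop, scanOKP]
  | cons i is ih =>
    intro done rows cols d1 d2 hr hc h1 h2
    simp only [qsBLoop, scanOKP]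
    split_ifs with h
    · simp only [false_iff]
      rintro ⟨hnone, -⟩
      simp only [Bool.or_eq_true, PySem.Set.contains_iff, hr, hc, h1, h2] at h
      rcases h with ((⟨j, hj, hje⟩ | ⟨j, hj, hje⟩) | ⟨j, hj, hje⟩) | ⟨j, hj, hje⟩ <;>
        exact hnone j hj (by unfold BAttP; omega)
    · simp only [Bool.or_eq_true, PySem.Set.contains_iff, hr, hc, h1, h2] at h
      push Not at h
      rw [ih (done ++ [i])]
      · constructor
        · intro hs
          refine ⟨?_, hs⟩
          intro j hj hb
          unfold BAttP at hb
          rcases hb with hb | hb | hb | hb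
          · exact h.1.1.1 j hj hb
          · exact h.1.1.2 j hj hb
          · exact h.1.2 j hj hb
          · exact h.2 j hj hb
        · exact fun hs => hs.2
      · intro x
        simp only [PySem.Set.mem_add, hr, List.mem_append, List.mem_singleton]
        constructor
        · rintro (⟨j, hj, hje⟩ | rfl)
          · exact ⟨j, Or.inl hj, hje⟩
          · exact ⟨i, Or.inr rfl, rfl⟩
        · rintro ⟨j, hj | rfl, hje⟩
          · exact Or.inl ⟨j, hj, hje⟩
          · exact Or.inr hje.symm
      · intro x
        simp only [PySem.Set.mem_add, hc, List.mem_append, List.mem_singleton]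
        constructor
        · rintro (⟨j, hj, hje⟩ | rfl)
          · exact ⟨j, Or.inl hj, hje⟩
          · exact ⟨i, Or.inr rfl, rfl⟩
        · rintro ⟨j, hj | rfl, hje⟩
          · exact Or.inl ⟨j, hj, hje⟩
          · exact Or.inr hje.symm
      · intro x
        simp only [PySem.Set.mem_add, h1, List.mem_append, List.mem_singleton]
        constructor
        · rintro (⟨j, hj, hje⟩ | rfl)
          · exact ⟨j, Or.inl hj, hje⟩
          · exact ⟨i, Or.inr rfl, rfl⟩
        · rintro ⟨j, hj | rfl, hje⟩
          · exact Or.inl ⟨j, hj, hje⟩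
          · exact Or.inr hje.symm
      · intro x
        simp only [PySem.Set.mem_add, h2, List.mem_append, List.mem_singleton]
        constructor
        · rintro (⟨j, hj, hje⟩ | rfl)
          · exact ⟨j, Or.inl hj, hje⟩
          · exact ⟨i, Or.inr rfl, rfl⟩
        · rintro ⟨j, hj | rfl, hje⟩
          · exact Or.inl ⟨j, hj, hje⟩
          · exact Or.inr hje.symm

lemma scanOKP_iff (queens : List (Int × Int)) (is : List Int) :
    ∀ done : List Int, scanOKP queens done is ↔
      (∀ j ∈ done, ∀ i ∈ is, ¬ BAttP (PySem.List.pyGetD queens j (0, 0)) (PySem.List.pyGetD queens i (0, 0))) ∧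
      is.Pairwise (fun j i => ¬ BAttP (PySem.List.pyGetD queens j (0, 0)) (PySem.List.pyGetD queens i (0, 0))) := by
  induction is with
  | nil => intro done; simp [scanOKP]
  | cons i is ih =>
    intro done
    simp only [scanOKP, ih, List.pairwise_cons, List.mem_append, List.mem_cons,
      List.not_mem_nil, or_false]
    constructor
    · rintro ⟨hd, hall, hpw⟩
      refine ⟨?_, ?_, hpw⟩
      · rintro j hj k (rfl | hk)
        · exact hd j hj
        · exact hall j (Or.inl hj) k hk
      · exact fun k hk => hall i (Or.inr rfl) k hk
    · rintro ⟨hall, hi, hpw⟩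
      refine ⟨fun j hj => hall j hj i (Or.inl rfl), ?_, hpw⟩
      rintro j (hj | rfl) k hk
      · exact hall j hj k (Or.inr hk)
      · exact hi k hk

lemma qsA_iff (queens : List (Int × Int)) :
    queens_shess queens = true ↔
      ∀ i j : Int, 0 ≤ i → i < j → j < 8 →
        ¬ AttP (PySem.List.pyGetD queens i (0, 0)) (PySem.List.pyGetD queens j (0, 0)) := by
  unfold queens_shess
  rw [qsAOuter_true_iff]
  constructor
  · intro hall i j h0 hij hj8
    have hi : i ∈ PySem.List.pyRange 0 8 1 := by
      rw [PySem.List.mem_pyRange_one]; omega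
    have := (qsAInner_true_iff queens i _).mp (hall i hi) j
      (by rw [PySem.List.mem_pyRange_one]; omega)
    exact this
  · intro hall i hi
    rw [qsAInner_true_iff]
    intro j hj
    rw [PySem.List.mem_pyRange_one] at hi hj
    exact hall i j (by omega) (by omega) (by omega)

lemma qsB_iff (queens : List (Int × Int)) :
    queens_shess_alt queens = true ↔
      ∀ i j : Int, 0 ≤ i → i < j → j < 8 →
        ¬ BAttP (PySem.List.pyGetD queens i (0, 0)) (PySem.List.pyGetD queens j (0, 0)) := by
  unfold queens_shess_alt
  rw [qsBLoop_true_iff queens _ [] _ _ _ _ (by simp [PySem.Set.empty]) (by simp [PySem.Set.empty])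
    (by simp [PySem.Set.empty]) (by simp [PySem.Set.empty]),
    scanOKP_iff]
  simp only [List.not_mem_nil, false_implies, implies_true, true_and]
  rw [List.pairwise_iff_getElem]
  constructor
  · intro hpw i j h0 hij hj8
    have hlen : (PySem.List.pyRange 0 8 1).length = 8 := by decide
    have hi : i.toNat < 8 := by omega
    have hj : j.toNat < 8 := by omega
    have := hpw i.toNat j.toNat (by omega) (by omega) (by omega)
    rwa [PySem.List.getElem_pyRange_one, PySem.List.getElem_pyRange_one,
      show (0 : Int) + i.toNat = i by omega, show (0 : Int) + j.toNat = j by omega] at this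
  · intro hall k l hk hl hkl
    have hlen : (PySem.List.pyRange 0 8 1).length = 8 := by decide
    rw [PySem.List.getElem_pyRange_one, PySem.List.getElem_pyRange_one]
    exact hall (0 + k) (0 + l) (by omega) (by omega) (by rw [hlen] at hl; omega)

-- ===== VERDICT (by name: the statement is the Claim_ definition above) =====
theorem queens_shess_spec : Claim_equal_queens_shess := by
  intro queens _ _
  unfold Spec_queens_shess
  apply Bool.eq_iff_iff.mpr
  rw [qsA_iff, qsB_iff]
  constructor <;> intro h i j h0 hij hj8 hb
  · exact h i j h0 hij hj8 ((attP_iff_battP _ _).mpr hb)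
  · exact h i j h0 hij hj8 ((attP_iff_battP _ _).mp hb)
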